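-- pv_equiv track=rewrite | github.com/PrakNew/LeetCode-Solutions | 1452. People Whose List of Favorite Companies Is Not a Subset of Another List/1452. People Whose List of Favorite Companies Is Not a Subset of Another List.py | peopleIndexes
-- ===== SOURCE A (Python) =====
-- def peopleIndexes(favoriteCompanies):
--
--     company_code = {}
--     code_company = {}
--     n = len(favoriteCompanies)
--     ct = 0
--
--     favoriteCodes = []
--
--     for i in range(n):
--         code = []
--         for j in range(len(favoriteCompanies[i])):
--             if favoriteCompanies[i][j] not in company_code:
--                 company_code[favoriteCompanies[i][j]] = ct
--             if ct not in code_company: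
--                 code_company[ct] = favoriteCompanies[i][j]
--                 ct+=1
--             code.append(company_code[favoriteCompanies[i][j]])
--         favoriteCodes.append(code)
--
--     ans = set()
--
--     def isSubset(i, j):
--         for x in favoriteCodes[i]:
--             if x not in favoriteCodes[j]:
--                 return False
--         return True
--
--     res = []
--
--     for i in range(n):
--         subset = False
--         for j in range(n):
--             if len(favoriteCodes[i])<len(favoriteCodes[j]) and isSubset(i, j):
--                 subset = True
--         if not subset:
--             res.append(i)
--
--     return res
-- ===== SOURCE B (Python) =====
-- def peopleIndexes(favoriteCompanies):
--     n = len(favoriteCompanies)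
--     index = {}
--     for j in range(n):
--         for c in favoriteCompanies[j]:
--             index.setdefault(c, set()).add(j)
--     res = []
--     for i in range(n):
--         cand = set(range(n))
--         for c in favoriteCompanies[i]:
--             cand &= index[c]
--         if not any(len(favoriteCompanies[j]) > len(favoriteCompanies[i]) for j in cand):
--             res.append(i)
--     return res
-- ===== Notes on version B (the rewrite author's own statement) =====
-- stated objective: alternative
-- what changed: Replaces A's string-to-integer recoding plus quadratic all-pairs isSubset scan by an inverted index (company -> set of owner indices) whose per-person intersection yields the superset candidates directly, keeping a person iff no candidate has a strictly longer list.
import Mathlib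
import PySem

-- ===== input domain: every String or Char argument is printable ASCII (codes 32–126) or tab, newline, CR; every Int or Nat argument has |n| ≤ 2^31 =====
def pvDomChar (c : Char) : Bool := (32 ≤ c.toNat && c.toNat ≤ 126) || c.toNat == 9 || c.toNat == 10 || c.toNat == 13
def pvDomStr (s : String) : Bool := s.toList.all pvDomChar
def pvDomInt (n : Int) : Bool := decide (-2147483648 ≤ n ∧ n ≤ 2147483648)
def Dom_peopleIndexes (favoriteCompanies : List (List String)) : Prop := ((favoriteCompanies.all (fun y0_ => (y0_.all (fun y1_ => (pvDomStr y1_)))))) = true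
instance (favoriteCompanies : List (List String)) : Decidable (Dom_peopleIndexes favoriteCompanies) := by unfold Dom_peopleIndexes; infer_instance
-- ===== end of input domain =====

-- B replaces A's quadratic all-pairs subset scan over integer-coded lists by an inverted
-- index (company → set of owners) whose intersections yield each person's superset
-- candidates directly (objective: alternative; not measurably faster).

-- ===== PORT A =====
-- body of A's inner encoding loop (one company c): both 'not in' guards, then
-- code.append(company_code[c]) — that lookup always succeeds, ported as getD.
def pvEncRow (st : PySem.Dict String Int × PySem.Dict Int String × Int × List Int)
    (c : String) : PySem.Dict String Int × PySem.Dict Int String × Int × List Int :=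
  let cc := if st.1.contains c then st.1 else st.1.insert c st.2.2.1
  let dc := if st.2.1.contains st.2.2.1 then st.2.1 else st.2.1.insert st.2.2.1 c
  let ct := if st.2.1.contains st.2.2.1 then st.2.2.1 else st.2.2.1 + 1
  (cc, dc, ct, st.2.2.2 ++ [cc.getD c 0])

-- A's 'for i in range(n)' encoding body: the inner 'for j in range(len(favoriteCompanies[i]))'
def pvEncRowLoop (st : PySem.Dict String Int × PySem.Dict Int String × Int × List (List Int))
    (row : List String) : PySem.Dict String Int × PySem.Dict Int String × Int × List (List Int) :=
  let st2 := (PySem.List.pyRange 0 (PySem.List.len row) 1).foldl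
    (fun st2 jj => pvEncRow st2 (PySem.List.pyGetD row jj ""))
    (st.1, st.2.1, st.2.2.1, ([] : List Int))
  (st2.1, st2.2.1, st2.2.2.1, st.2.2.2 ++ [st2.2.2.2])

-- A's isSubset(i, j): an early-return membership loop, ported as .all/.contains
def pvIsSubset (fcs : List (List Int)) (i j : Int) : Bool :=
  (PySem.List.pyGetD fcs i []).all (fun x => (PySem.List.pyGetD fcs j []).contains x)

def peopleIndexes (favoriteCompanies : List (List String)) : List Int :=
  let n := PySem.List.len favoriteCompanies
  let enc := (PySem.List.pyRange 0 n 1).foldl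
    (fun st i => pvEncRowLoop st (PySem.List.pyGetD favoriteCompanies i []))
    (PySem.Dict.empty, PySem.Dict.empty, 0, [])
  let favoriteCodes := enc.2.2.2
  -- A's 'ans = set()' is never used and is dropped
  (PySem.List.pyRange 0 n 1).foldl
    (fun res i =>
      let subset := (PySem.List.pyRange 0 n 1).foldl
        (fun subset j =>
          if decide (PySem.List.len (PySem.List.pyGetD favoriteCodes i []) <
                     PySem.List.len (PySem.List.pyGetD favoriteCodes j [])) &&
             pvIsSubset favoriteCodes i j then true else subset)
        false
      if subset then res else res ++ [i])
    []

-- ===== PORT B =====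
def peopleIndexes_alt (favoriteCompanies : List (List String)) : List Int :=
  let n := PySem.List.len favoriteCompanies
  -- index.setdefault(c, set()).add(j) mutates the set stored at c: ported as Dict.modify
  let index := (PySem.List.pyRange 0 n 1).foldl
    (fun (index : PySem.Dict String (PySem.Set Int)) j =>
      (PySem.List.pyGetD favoriteCompanies j []).foldl
        (fun index c => index.modify c PySem.Set.empty (fun s => PySem.Set.add s j))
        index)
    PySem.Dict.empty
  (PySem.List.pyRange 0 n 1).foldl
    (fun res i =>
      -- index[c] is looked up only for c ∈ favoriteCompanies[i], so the key exists: getD is exact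
      let cand := (PySem.List.pyGetD favoriteCompanies i []).foldl
        (fun cand c => PySem.Set.inter cand (index.getD c PySem.Set.empty))
        (PySem.Set.ofList (PySem.List.pyRange 0 n 1))
      -- any(...) over a set: a Bool, independent of iteration order
      if cand.any (fun j => decide (PySem.List.len (PySem.List.pyGetD favoriteCompanies j []) >
                                    PySem.List.len (PySem.List.pyGetD favoriteCompanies i []))) then
        res
      else res ++ [i])
    []

-- ===== PRECONDITION & SPEC =====
def Spec_peopleIndexes (favoriteCompanies : List (List String)) (out : List Int) : Prop := out = peopleIndexes_alt favoriteCompanies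
instance (favoriteCompanies : List (List String)) (out : List Int) : Decidable (Spec_peopleIndexes favoriteCompanies out) := by unfold Spec_peopleIndexes; infer_instance

-- ===== CLAIM (what is proved, stated in full; the proofs are below) =====
def Claim_equal_peopleIndexes : Prop := ∀ (favoriteCompanies : List (List String)), Dom_peopleIndexes favoriteCompanies → Spec_peopleIndexes favoriteCompanies (peopleIndexes favoriteCompanies)

-- ===== LEMMAS AND PROOFS =====

-- the common normal form both programs are reduced to
def pvSpecList (F : List (List String)) : List Int :=
  (PySem.List.pyRange 0 (PySem.List.len F) 1).filter (fun i =>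
    !((PySem.List.pyRange 0 (PySem.List.len F) 1).any (fun j =>
      decide ((PySem.List.pyGetD F i []).length < (PySem.List.pyGetD F j []).length) &&
      (PySem.List.pyGetD F i []).all (fun c => (PySem.List.pyGetD F j []).contains c))))

lemma pv_foldl_guard_append (js : List Int) (g : Int → Bool) (acc : List Int) :
    js.foldl (fun res i => if g i then res else res ++ [i]) acc
      = acc ++ js.filter (fun i => !g i) := by
  induction js generalizing acc with
  | nil => simp
  | cons j rest ih =>
    simp only [List.foldl_cons, List.filter_cons]
    cases h : g j <;> simp [ih]

lemma pv_inner_index (cs : List String) (j : Int) : ∀ (d : PySem.Dict String (PySem.Set Int)) (c : String),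
    (cs.foldl (fun idx c => idx.modify c PySem.Set.empty (fun s => PySem.Set.add s j)) d).getD c PySem.Set.empty
    = if c ∈ cs then PySem.Set.add (d.getD c PySem.Set.empty) j else d.getD c PySem.Set.empty := by
  induction cs with
  | nil => simp
  | cons c0 rest ih =>
    intro d c
    simp only [List.foldl_cons, ih]
    by_cases hc : c = c0
    · subst hc
      by_cases hr : c ∈ rest <;>
        simp [hr, PySem.Dict.getD_modify_self]
    · by_cases hr : c ∈ rest <;> simp [hr, PySem.Dict.getD_modify, hc]

lemma pv_index_mem (F : List (List String)) (js : List Int) :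
    ∀ (d : PySem.Dict String (PySem.Set Int)) (c : String) (x : Int),
    x ∈ (js.foldl (fun idx j => (PySem.List.pyGetD F j []).foldl
          (fun idx c => idx.modify c PySem.Set.empty (fun s => PySem.Set.add s j)) idx) d).getD c PySem.Set.empty
    ↔ x ∈ d.getD c PySem.Set.empty ∨ (x ∈ js ∧ c ∈ PySem.List.pyGetD F x []) := by
  induction js with
  | nil => simp
  | cons j rest ih =>
    intro d c x
    simp only [List.foldl_cons, ih, pv_inner_index]
    by_cases hm : c ∈ PySem.List.pyGetD F j []
    · simp only [hm, if_pos, PySem.Set.mem_add, List.mem_cons]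
      constructor
      · rintro ((h | rfl) | h)
        · exact Or.inl h
        · exact Or.inr ⟨Or.inl rfl, hm⟩
        · exact Or.inr ⟨Or.inr h.1, h.2⟩
      · rintro (h | ⟨(rfl | h), hx⟩)
        · exact Or.inl (Or.inl h)
        · exact Or.inl (Or.inr rfl)
        · exact Or.inr ⟨h, hx⟩
    · simp only [hm, if_neg, List.mem_cons, not_false_iff]
      constructor
      · rintro (h | h)
        · exact Or.inl h
        · exact Or.inr ⟨Or.inr h.1, h.2⟩
      · rintro (h | ⟨(rfl | h), hx⟩)
        · exact Or.inl h
        · exact absurd hx hm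
        · exact Or.inr ⟨h, hx⟩

lemma pv_cand_mem (index : PySem.Dict String (PySem.Set Int)) (cs : List String) :
    ∀ (init : List Int) (x : Int),
    x ∈ cs.foldl (fun cand c => PySem.Set.inter cand (index.getD c PySem.Set.empty)) init
    ↔ x ∈ init ∧ ∀ c ∈ cs, x ∈ index.getD c PySem.Set.empty := by
  induction cs with
  | nil => simp
  | cons c0 rest ih =>
    intro init x
    simp only [List.foldl_cons, ih, PySem.Set.mem_inter, List.mem_cons]
    constructor
    · rintro ⟨⟨h1, h2⟩, h3⟩
      exact ⟨h1, fun c hc => hc.elim (fun e => e ▸ h2) (h3 c)⟩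
    · rintro ⟨h1, h2⟩
      exact ⟨⟨h1, h2 c0 (Or.inl rfl)⟩, fun c hc => h2 c (Or.inr hc)⟩

lemma pv_mem_empty (c : String) (x : Int) :
    (x ∈ (PySem.Dict.empty : PySem.Dict String (PySem.Set Int)).getD c PySem.Set.empty) ↔ False := by
  simp [PySem.Dict.getD_empty, PySem.Set.empty]

lemma pvB_eq_spec (F : List (List String)) : peopleIndexes_alt F = pvSpecList F := by
  unfold peopleIndexes_alt pvSpecList
  rw [pv_foldl_guard_append]
  simp only [List.nil_append]
  apply List.filter_congr
  intro i hi
  congr 1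
  apply Bool.eq_iff_iff.mpr
  simp only [List.any_eq_true, pv_cand_mem, pv_index_mem, pv_mem_empty,
    PySem.Set.mem_ofList, List.all_eq_true, List.contains_iff_mem, decide_eq_true_eq,
    gt_iff_lt, PySem.List.len_eq, Bool.and_eq_true, false_or, Nat.cast_lt]
  constructor
  · rintro ⟨j, ⟨hjr, hsub⟩, hlt⟩
    exact ⟨j, hjr, hlt, fun c hc => (hsub c hc).2⟩
  · rintro ⟨j, hjr, hlt, hsub⟩
    exact ⟨j, ⟨hjr, fun c hc => ⟨hjr, hsub c hc⟩⟩, hlt⟩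

def pvInv (cc : PySem.Dict String Int) (dc : PySem.Dict Int String) (ct : Int) : Prop :=
  (∀ s v, cc.get? s = some v → v < ct) ∧
  (∀ k, dc.contains k = true → k < ct) ∧
  (∀ s t v, cc.get? s = some v → cc.get? t = some v → s = t)

lemma pvEncRow_step (st : PySem.Dict String Int × PySem.Dict Int String × Int × List Int)
    (c : String) (h : pvInv st.1 st.2.1 st.2.2.1) :
    pvInv (pvEncRow st c).1 (pvEncRow st c).2.1 (pvEncRow st c).2.2.1 ∧
    (∀ s v, st.1.get? s = some v → (pvEncRow st c).1.get? s = some v) ∧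
    (∃ v, (pvEncRow st c).1.get? c = some v) ∧
    (pvEncRow st c).2.2.2 = st.2.2.2 ++ [(pvEncRow st c).1.getD c 0] := by
  obtain ⟨hb, hd, hinj⟩ := h
  have hdc : st.2.1.contains st.2.2.1 = false := by
    cases hct : st.2.1.contains st.2.2.1 with
    | false => rfl
    | true => exact absurd (hd _ hct) (lt_irrefl _)
  have hdkeys : ∀ k, (st.2.1.insert st.2.2.1 c).contains k = true → k < st.2.2.1 + 1 := by
    intro k hk
    rw [PySem.Dict.contains_insert] at hk
    rcases Bool.or_eq_true_iff.mp hk with h1 | h1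
    · have : k = st.2.2.1 := by simpa using h1
      omega
    · exact lt_trans (hd _ h1) (by omega)
  by_cases hc : st.1.contains c = true
  · refine ⟨⟨?_, ?_, ?_⟩, ?_, ?_, ?_⟩ <;>
      simp only [pvEncRow, hc, hdc, if_true, if_false, Bool.false_eq_true]
    · exact fun s v hv => lt_trans (hb s v hv) (by omega)
    · exact hdkeys
    · exact hinj
    · exact fun s v hv => hv
    · have hsome : (st.1.get? c).isSome = true := by
        rw [← PySem.Dict.contains_eq_isSome_get?, hc]
      obtain ⟨v, hv⟩ := Option.isSome_iff_exists.mp hsome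
      exact ⟨v, hv⟩
  · have hc' : st.1.contains c = false := by simpa using hc
    refine ⟨⟨?_, ?_, ?_⟩, ?_, ?_, ?_⟩ <;>
      simp only [pvEncRow, hc', hdc, if_false, Bool.false_eq_true]
    · intro s v hv
      rcases eq_or_ne s c with rfl | hne
      · rw [PySem.Dict.get?_insert_self] at hv
        have : v = st.2.2.1 := by simpa using hv.symm
        omega
      · rw [PySem.Dict.get?_insert_of_ne _ _ hne] at hv
        have := hb s v hv
        omega
    · exact hdkeys
    · intro s t v hs ht
      by_cases hs' : s = c
      · by_cases ht' : t = c
        · rw [hs', ht']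
        · subst hs'
          rw [PySem.Dict.get?_insert_self] at hs
          rw [PySem.Dict.get?_insert_of_ne _ _ ht'] at ht
          have hv : v = st.2.2.1 := by simpa using hs.symm
          have := hb t v ht
          omega
      · by_cases ht' : t = c
        · subst ht'
          rw [PySem.Dict.get?_insert_self] at ht
          rw [PySem.Dict.get?_insert_of_ne _ _ hs'] at hs
          have hv : v = st.2.2.1 := by simpa using ht.symm
          have := hb s v hs
          omega
        · rw [PySem.Dict.get?_insert_of_ne _ _ hs'] at hs
          rw [PySem.Dict.get?_insert_of_ne _ _ ht'] at ht
          exact hinj s t v hs ht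
    · intro s v hv
      have hne : s ≠ c := by
        intro e; subst e
        rw [PySem.Dict.contains_eq_isSome_get?, hv] at hc'
        simp at hc'
      rw [PySem.Dict.get?_insert_of_ne _ _ hne]
      exact hv
    · exact ⟨st.2.2.1, PySem.Dict.get?_insert_self _ _ _⟩

lemma pvEncRow_fold (row : List String) :
    ∀ st, pvInv st.1 st.2.1 st.2.2.1 →
    pvInv (row.foldl pvEncRow st).1 (row.foldl pvEncRow st).2.1 (row.foldl pvEncRow st).2.2.1 ∧
    (∀ s v, st.1.get? s = some v → (row.foldl pvEncRow st).1.get? s = some v) ∧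
    (∀ s, s ∈ row → ∃ v, (row.foldl pvEncRow st).1.get? s = some v) ∧
    (row.foldl pvEncRow st).2.2.2
      = st.2.2.2 ++ row.map (fun c => (row.foldl pvEncRow st).1.getD c 0) := by
  induction row with
  | nil => intro st h; exact ⟨h, fun s v hv => hv, by simp, by simp⟩
  | cons c rest ih =>
    intro st h
    obtain ⟨hi1, hp1, he1, hc1⟩ := pvEncRow_step st c h
    obtain ⟨hi2, hp2, he2, hc2⟩ := ih (pvEncRow st c) hi1
    simp only [List.foldl_cons]
    refine ⟨hi2, fun s v hv => hp2 s v (hp1 s v hv), ?_, ?_⟩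
    · intro s hs
      rcases List.mem_cons.mp hs with rfl | hs'
      · obtain ⟨v, hv⟩ := he1
        exact ⟨v, hp2 s v hv⟩
      · exact he2 s hs'
    · rw [hc2, hc1]
      obtain ⟨v, hv⟩ := he1
      have e1 : (pvEncRow st c).1.getD c 0 = v := PySem.Dict.getD_of_get?_eq_some _ _ hv
      have e2 : (rest.foldl pvEncRow (pvEncRow st c)).1.getD c 0 = v :=
        PySem.Dict.getD_of_get?_eq_some _ _ (hp2 c v hv)
      simp [e1, e2]

lemma pvEncRowLoop_eq (st : PySem.Dict String Int × PySem.Dict Int String × Int × List (List Int))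
    (row : List String) :
    pvEncRowLoop st row =
      ((row.foldl pvEncRow (st.1, st.2.1, st.2.2.1, ([] : List Int))).1,
       (row.foldl pvEncRow (st.1, st.2.1, st.2.2.1, ([] : List Int))).2.1,
       (row.foldl pvEncRow (st.1, st.2.1, st.2.2.1, ([] : List Int))).2.2.1,
       st.2.2.2 ++ [(row.foldl pvEncRow (st.1, st.2.1, st.2.2.1, ([] : List Int))).2.2.2]) := by
  unfold pvEncRowLoop
  rw [PySem.List.foldl_pyRange_zero_pyGetD row "" pvEncRow]

lemma pvEncOuter_fold (rows : List (List String)) :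
    ∀ st, pvInv st.1 st.2.1 st.2.2.1 →
    pvInv (rows.foldl pvEncRowLoop st).1 (rows.foldl pvEncRowLoop st).2.1
      (rows.foldl pvEncRowLoop st).2.2.1 ∧
    (∀ s v, st.1.get? s = some v → (rows.foldl pvEncRowLoop st).1.get? s = some v) ∧
    (∀ s, (∃ row ∈ rows, s ∈ row) → ∃ v, (rows.foldl pvEncRowLoop st).1.get? s = some v) ∧
    (rows.foldl pvEncRowLoop st).2.2.2
      = st.2.2.2 ++ rows.map (fun row => row.map (fun c => (rows.foldl pvEncRowLoop st).1.getD c 0)) := by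
  induction rows with
  | nil => intro st h; exact ⟨h, fun s v hv => hv, by simp, by simp⟩
  | cons row rest ih =>
    intro st h
    obtain ⟨hi1, hp1, he1, hc1⟩ := pvEncRow_fold row (st.1, st.2.1, st.2.2.1, ([] : List Int)) h
    simp only [List.foldl_cons]
    rw [pvEncRowLoop_eq st row] at *
    set f := row.foldl pvEncRow (st.1, st.2.1, st.2.2.1, ([] : List Int)) with hf
    obtain ⟨hi2, hp2, he2, hc2⟩ := ih (f.1, f.2.1, f.2.2.1, st.2.2.2 ++ [f.2.2.2]) hi1
    refine ⟨hi2, fun s v hv => hp2 s v (hp1 s v hv), ?_, ?_⟩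
    · intro s hs
      obtain ⟨r, hr, hsr⟩ := hs
      rcases List.mem_cons.mp hr with rfl | hr'
      · obtain ⟨v, hv⟩ := he1 s hsr
        exact ⟨v, hp2 s v hv⟩
      · exact he2 s ⟨r, hr', hsr⟩
    · rw [hc2]
      simp only [List.map_cons]
      have hc1' : f.2.2.2 = row.map (fun c => f.1.getD c 0) := by simpa using hc1
      have hmc : row.map (fun c => f.1.getD c 0)
           = row.map (fun c => (List.foldl pvEncRowLoop (f.1, f.2.1, f.2.2.1, st.2.2.2 ++ [f.2.2.2]) rest).1.getD c 0) := by
        apply List.map_congr_left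
        intro c hc
        obtain ⟨v, hv⟩ := he1 c hc
        rw [PySem.Dict.getD_of_get?_eq_some _ _ hv, PySem.Dict.getD_of_get?_eq_some _ _ (hp2 c v hv)]
      rw [← hmc, hc1']
      simp

lemma pvA_eq_spec (F : List (List String)) : peopleIndexes F = pvSpecList F := by
  simp only [peopleIndexes, pvSpecList]
  rw [PySem.List.foldl_pyRange_zero_pyGetD F [] pvEncRowLoop]
  rw [pv_foldl_guard_append]
  simp only [List.nil_append]
  obtain ⟨⟨hb, hd, hinj⟩, hper, hex, hcs⟩ :=
    pvEncOuter_fold F (PySem.Dict.empty, PySem.Dict.empty, 0, ([] : List (List Int)))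
      ⟨(by intro s v hv; rw [PySem.Dict.get?_empty] at hv; cases hv),
       (by intro k hk; rw [PySem.Dict.contains_empty] at hk; cases hk),
       (by intro s t v hs _; rw [PySem.Dict.get?_empty] at hs; cases hs)⟩
  set f := F.foldl pvEncRowLoop (PySem.Dict.empty, PySem.Dict.empty, 0, ([] : List (List Int))) with hf
  have key : ∀ k : Int, 0 ≤ k → k < (F.length : Int) →
      PySem.List.pyGetD f.2.2.2 k [] = (PySem.List.pyGetD F k []).map (fun c => f.1.getD c 0) := by
    intro k h0 h1
    rw [hcs]
    simp only [List.nil_append]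
    rw [PySem.List.pyGetD_eq_getElem _ _ h0 (by simpa using h1),
        PySem.List.pyGetD_eq_getElem _ _ h0 h1]
    simp
  have hmemF : ∀ k : Int, 0 ≤ k → k < (F.length : Int) →
      ∀ c ∈ PySem.List.pyGetD F k [], ∃ v, f.1.get? c = some v := by
    intro k h0 h1 c hc
    apply hex
    rw [PySem.List.pyGetD_eq_getElem _ _ h0 h1] at hc
    exact ⟨F[k.toNat], List.getElem_mem _, hc⟩
  apply List.filter_congr
  intro i hi
  rw [PySem.List.foldl_if_true_eq]
  simp only [Bool.false_or]
  congr 1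
  apply PySem.List.any_congr_mem
  intro j hj
  rw [PySem.List.mem_pyRange_one] at hi hj
  simp only [PySem.List.len_eq] at hi hj
  obtain ⟨hi0, hi1⟩ := hi
  obtain ⟨hj0, hj1⟩ := hj
  apply Bool.eq_iff_iff.mpr
  simp only [pvIsSubset, key i hi0 hi1, key j hj0 hj1, Bool.and_eq_true, decide_eq_true_eq,
    List.all_eq_true, List.contains_iff_mem, List.length_map, PySem.List.len_eq,
    Nat.cast_lt, List.mem_map]
  constructor
  · rintro ⟨hlen, hsub⟩
    refine ⟨hlen, fun c hc => ?_⟩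
    obtain ⟨t, ht, hct⟩ := hsub (f.1.getD c 0) ⟨c, hc, rfl⟩
    obtain ⟨v, hv⟩ := hmemF i hi0 hi1 c hc
    obtain ⟨w, hw⟩ := hmemF j hj0 hj1 t ht
    have ev : f.1.getD c 0 = v := PySem.Dict.getD_of_get?_eq_some _ _ hv
    have ew : f.1.getD t 0 = w := PySem.Dict.getD_of_get?_eq_some _ _ hw
    have hwv : w = v := by rw [← ew, hct, ev]
    have : t = c := hinj t c v (hwv ▸ hw) hv
    exact this ▸ ht
  · rintro ⟨hlen, hsub⟩
    refine ⟨hlen, fun x hx => ?_⟩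
    obtain ⟨c, hc, rfl⟩ := hx
    exact ⟨c, hsub c hc, rfl⟩

-- ===== VERDICT (by name: the statement is the Claim_ definition above) =====
theorem peopleIndexes_spec : Claim_equal_peopleIndexes := by
  intro F _
  unfold Spec_peopleIndexes
  rw [pvA_eq_spec, pvB_eq_spec]
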